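-- pv_equiv track=rewrite | github.com/Everaldtah/standup-digest | main.py | generate_rule_based_summary
-- ===== SOURCE A (Python) =====
-- BLOCKER_KEYWORDS = [
--     "blocked", "blocking", "stuck", "waiting for", "need help", "can't proceed",
--     "dependency", "delayed", "postponed", "escalate", "urgent", "help needed",
--     "issue", "problem", "error", "bug", "failing", "broken"
-- ]
--
-- def generate_rule_based_summary(updates_text: str, team_name: str, standup_date: str) -> str:
--     """Fallback summary when no AI API is available."""
--     lines = updates_text.strip().split("\n")
--     completed_items = [l for l in lines if "yesterday" in l.lower() or "✓" in l or "completed" in l.lower()]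
--     today_items = [l for l in lines if "today" in l.lower() or "planning" in l.lower()]
--     blocker_items = [l for l in lines if any(kw in l.lower() for kw in BLOCKER_KEYWORDS)]
--
--     summary = f"## {team_name} — Standup Digest for {standup_date}\n\n"
--     summary += "**Overall Team Progress**\n"
--     summary += "Team submitted updates for the day. See individual summaries below.\n\n"
--
--     if completed_items:
--         summary += "**Key Completions**\n"
--         for item in completed_items[:5]:
--             summary += f"- {item.strip()}\n"
--         summary += "\n"
--
--     if today_items:
--         summary += "**Today's Focus**\n"
--         for item in today_items[:5]:
--             summary += f"- {item.strip()}\n"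
--         summary += "\n"
--
--     if blocker_items:
--         summary += "**⚠️ Blockers & Risks**\n"
--         for item in blocker_items[:5]:
--             summary += f"- {item.strip()}\n"
--
--     return summary
-- ===== SOURCE B (Python) =====
-- BLOCKER_KEYWORDS = [
--     "blocked", "blocking", "stuck", "waiting for", "need help", "can't proceed",
--     "dependency", "delayed", "postponed", "escalate", "urgent", "help needed",
--     "issue", "problem", "error", "bug", "failing", "broken"
-- ]
--
-- def generate_rule_based_summary(updates_text: str, team_name: str, standup_date: str) -> str:
--     """Bounded single pass: keep at most 5 already-formatted bullets per section,
--     stop scanning early once every section is full; no filtering, slicing or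
--     post-hoc formatting passes."""
--     done, today, block = [], [], []
--     for l in updates_text.strip().split("\n"):
--         if len(done) == 5 and len(today) == 5 and len(block) == 5:
--             break
--         low = l.lower()
--         bullet = f"- {l.strip()}\n"
--         if len(done) < 5 and ("yesterday" in low or "✓" in l or "completed" in low):
--             done.append(bullet)
--         if len(today) < 5 and ("today" in low or "planning" in low):
--             today.append(bullet)
--         if len(block) < 5 and any(kw in low for kw in BLOCKER_KEYWORDS):
--             block.append(bullet)
--     out = (f"## {team_name} — Standup Digest for {standup_date}\n\n"
--            "**Overall Team Progress**\n"
--            "Team submitted updates for the day. See individual summaries below.\n\n")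
--     for header, bullets, tail in (("**Key Completions**\n", done, "\n"),
--                                   ("**Today's Focus**\n", today, "\n"),
--                                   ("**⚠️ Blockers & Risks**\n", block, "")):
--         if bullets:
--             out += header + "".join(bullets) + tail
--     return out
-- ===== Notes on version B (the rewrite author's own statement) =====
-- stated objective: alternative
-- what changed: B never materialises the three filtered line lists: one bounded pass keeps at most 5 already-formatted bullet strings per section and breaks out of the scan as soon as all three sections are full, so A's filter-everything + [:5] slice + per-section formatting loops disappear; the report is then assembled from a (header, bullets, tail) section table.
import Mathlib
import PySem

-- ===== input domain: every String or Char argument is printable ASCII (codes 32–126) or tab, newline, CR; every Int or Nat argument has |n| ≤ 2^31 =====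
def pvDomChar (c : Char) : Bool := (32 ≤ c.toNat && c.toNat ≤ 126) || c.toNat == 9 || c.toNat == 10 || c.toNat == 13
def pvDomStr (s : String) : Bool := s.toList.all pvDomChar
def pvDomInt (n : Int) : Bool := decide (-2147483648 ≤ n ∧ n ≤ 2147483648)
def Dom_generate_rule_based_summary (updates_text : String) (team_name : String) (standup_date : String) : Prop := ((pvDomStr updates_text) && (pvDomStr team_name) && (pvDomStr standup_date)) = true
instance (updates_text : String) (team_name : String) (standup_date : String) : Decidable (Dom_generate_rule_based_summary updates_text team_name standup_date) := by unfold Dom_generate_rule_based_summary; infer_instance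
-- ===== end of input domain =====

-- B: one bounded pass keeping at most 5 pre-formatted bullets per section with an early break,
-- instead of A's filter-everything, [:5] slices and three copy-pasted formatting loops (objective: alternative).

-- ===== PORT A =====
def pvBlockerKeywords : List (List Char) :=
  ["blocked".toList, "blocking".toList, "stuck".toList, "waiting for".toList, "need help".toList,
   "can't proceed".toList, "dependency".toList, "delayed".toList, "postponed".toList,
   "escalate".toList, "urgent".toList, "help needed".toList, "issue".toList, "problem".toList,
   "error".toList, "bug".toList, "failing".toList, "broken".toList]

def pvIsCompleted (l : List Char) : Bool :=
  PySem.Chars.isIn "yesterday".toList (PySem.Chars.lower l) || PySem.Chars.isIn "✓".toList l ||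
  PySem.Chars.isIn "completed".toList (PySem.Chars.lower l)

def pvIsToday (l : List Char) : Bool :=
  PySem.Chars.isIn "today".toList (PySem.Chars.lower l) ||
  PySem.Chars.isIn "planning".toList (PySem.Chars.lower l)

def pvIsBlocker (l : List Char) : Bool :=
  pvBlockerKeywords.any (fun kw => PySem.Chars.isIn kw (PySem.Chars.lower l))

def generate_rule_based_summary (updates_text : String) (team_name : String) (standup_date : String) : String :=
  let lines := PySem.Chars.splitOn (PySem.Chars.strip updates_text.toList) "\n".toList
  let completed_items := lines.filter pvIsCompleted
  let today_items := lines.filter pvIsToday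
  let blocker_items := lines.filter pvIsBlocker
  let summary := "## ".toList ++ team_name.toList ++ " — Standup Digest for ".toList ++ standup_date.toList ++ "\n\n".toList
  let summary := summary ++ "**Overall Team Progress**\n".toList
  let summary := summary ++ "Team submitted updates for the day. See individual summaries below.\n\n".toList
  let summary := if completed_items ≠ [] then
      ((PySem.List.slice completed_items none (some 5)).foldl
        (fun acc item => acc ++ "- ".toList ++ PySem.Chars.strip item ++ "\n".toList)
        (summary ++ "**Key Completions**\n".toList)) ++ "\n".toList
    else summary
  let summary := if today_items ≠ [] then
      ((PySem.List.slice today_items none (some 5)).foldl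
        (fun acc item => acc ++ "- ".toList ++ PySem.Chars.strip item ++ "\n".toList)
        (summary ++ "**Today's Focus**\n".toList)) ++ "\n".toList
    else summary
  let summary := if blocker_items ≠ [] then
      (PySem.List.slice blocker_items none (some 5)).foldl
        (fun acc item => acc ++ "- ".toList ++ PySem.Chars.strip item ++ "\n".toList)
        (summary ++ "**⚠️ Blockers & Risks**\n".toList)
    else summary
  String.ofList summary

-- ===== PORT B =====
def pvBullet (l : List Char) : List Char := "- ".toList ++ PySem.Chars.strip l ++ "\n".toList

-- the bounded collecting loop of Source B: at most 5 bullets per bucket, break when all full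
def pvCollect : List (List Char) → List (List Char) × List (List Char) × List (List Char) →
    List (List Char) × List (List Char) × List (List Char)
  | [], acc => acc
  | l :: rest, (done, today, block) =>
    if done.length = 5 ∧ today.length = 5 ∧ block.length = 5 then (done, today, block)
    else
      let low := PySem.Chars.lower l
      let bullet := pvBullet l
      pvCollect rest
        ((if done.length < 5 ∧ (PySem.Chars.isIn "yesterday".toList low || PySem.Chars.isIn "✓".toList l ||
            PySem.Chars.isIn "completed".toList low) then done ++ [bullet] else done),
         (if today.length < 5 ∧ (PySem.Chars.isIn "today".toList low || PySem.Chars.isIn "planning".toList low)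
            then today ++ [bullet] else today),
         (if block.length < 5 ∧ pvBlockerKeywords.any (fun kw => PySem.Chars.isIn kw low)
            then block ++ [bullet] else block))

def generate_rule_based_summary_alt (updates_text : String) (team_name : String) (standup_date : String) : String :=
  let tri := pvCollect (PySem.Chars.splitOn (PySem.Chars.strip updates_text.toList) "\n".toList) ([], [], [])
  let out := "## ".toList ++ team_name.toList ++ " — Standup Digest for ".toList ++ standup_date.toList ++
    "\n\n**Overall Team Progress**\nTeam submitted updates for the day. See individual summaries below.\n\n".toList
  let sections : List (List Char × List (List Char) × List Char) :=
    [("**Key Completions**\n".toList, tri.1, "\n".toList),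
     ("**Today's Focus**\n".toList, tri.2.1, "\n".toList),
     ("**⚠️ Blockers & Risks**\n".toList, tri.2.2, [])]
  let out := sections.foldl (fun acc sec =>
    if sec.2.1 ≠ [] then acc ++ sec.1 ++ PySem.Chars.join [] sec.2.1 ++ sec.2.2 else acc) out
  String.ofList out

-- ===== PRECONDITION & SPEC =====
def Spec_generate_rule_based_summary (updates_text : String) (team_name : String) (standup_date : String) (out : String) : Prop := out = generate_rule_based_summary_alt updates_text team_name standup_date
instance (updates_text : String) (team_name : String) (standup_date : String) (out : String) : Decidable (Spec_generate_rule_based_summary updates_text team_name standup_date out) := by unfold Spec_generate_rule_based_summary; infer_instance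

-- ===== CLAIM (what is proved, stated in full; the proofs are below) =====
def Claim_equal_generate_rule_based_summary : Prop := ∀ (updates_text : String) (team_name : String) (standup_date : String), Dom_generate_rule_based_summary updates_text team_name standup_date → Spec_generate_rule_based_summary updates_text team_name standup_date (generate_rule_based_summary updates_text team_name standup_date)

-- ===== LEMMAS AND PROOFS =====

-- ''.join on List Char parts is flatten
theorem pv_join_nil_eq_flatten (parts : List (List Char)) :
    PySem.Chars.join [] parts = parts.flatten := by
  induction parts with
  | nil => simp [PySem.Chars.join, List.intercalate]
  | cons p rest ih =>
    cases rest with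
    | nil => simp [PySem.Chars.join, List.intercalate]
    | cons q r =>
      rw [PySem.Chars.join_cons_cons, ih]
      simp

-- the bounded collecting pass computes the first-5 formatted bullets of each filter
theorem pv_collect_eq (lines : List (List Char)) (d t b : List (List Char)) :
    pvCollect lines (d, t, b) =
      (d ++ ((lines.filter pvIsCompleted).map pvBullet).take (5 - d.length),
       t ++ ((lines.filter pvIsToday).map pvBullet).take (5 - t.length),
       b ++ ((lines.filter pvIsBlocker).map pvBullet).take (5 - b.length)) := by
  induction lines generalizing d t b with
  | nil => simp [pvCollect]
  | cons l rest ih =>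
    rw [pvCollect]
    split_ifs with hfull
    · obtain ⟨h1, h2, h3⟩ := hfull
      simp [h1, h2, h3]
    · rw [ih]
      simp only [List.filter_cons]
      refine Prod.ext ?_ (Prod.ext ?_ ?_) <;> simp only
      · by_cases hp : pvIsCompleted l
        · have hb : (PySem.Chars.isIn "yesterday".toList (PySem.Chars.lower l) || PySem.Chars.isIn "\u2713".toList l || PySem.Chars.isIn "completed".toList (PySem.Chars.lower l)) = true := hp
          rw [if_pos hp, List.map_cons]
          rcases Nat.lt_or_ge d.length 5 with hl | hl
          · rw [if_pos ⟨hl, hb⟩]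
            have h5 : 5 - d.length = (5 - (d ++ [pvBullet l]).length) + 1 := by simp; omega
            rw [h5, List.take_succ_cons]
            simp
          · rw [if_neg (fun h => absurd h.1 (Nat.not_lt.mpr hl))]
            have h0 : 5 - d.length = 0 := by omega
            simp [h0]
        · rw [if_neg (fun h => hp h.2), if_neg hp]
      · by_cases hp : pvIsToday l
        · have hb : (PySem.Chars.isIn "today".toList (PySem.Chars.lower l) || PySem.Chars.isIn "planning".toList (PySem.Chars.lower l)) = true := hp
          rw [if_pos hp, List.map_cons]
          rcases Nat.lt_or_ge t.length 5 with hl | hl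
          · rw [if_pos ⟨hl, hb⟩]
            have h5 : 5 - t.length = (5 - (t ++ [pvBullet l]).length) + 1 := by simp; omega
            rw [h5, List.take_succ_cons]
            simp
          · rw [if_neg (fun h => absurd h.1 (Nat.not_lt.mpr hl))]
            have h0 : 5 - t.length = 0 := by omega
            simp [h0]
        · rw [if_neg (fun h => hp h.2), if_neg hp]
      · by_cases hp : pvIsBlocker l
        · have hb : (pvBlockerKeywords.any (fun kw => PySem.Chars.isIn kw (PySem.Chars.lower l))) = true := hp
          rw [if_pos hp, List.map_cons]
          rcases Nat.lt_or_ge b.length 5 with hl | hl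
          · rw [if_pos ⟨hl, hb⟩]
            have h5 : 5 - b.length = (5 - (b ++ [pvBullet l]).length) + 1 := by simp; omega
            rw [h5, List.take_succ_cons]
            simp
          · rw [if_neg (fun h => absurd h.1 (Nat.not_lt.mpr hl))]
            have h0 : 5 - b.length = 0 := by omega
            simp [h0]
        · rw [if_neg (fun h => hp h.2), if_neg hp]

-- A's bullet-append loop equals the flattened map of formatted bullets
theorem pv_bullet_loop (items : List (List Char)) (acc : List Char) :
    items.foldl (fun acc item => acc ++ "- ".toList ++ PySem.Chars.strip item ++ "\n".toList) acc
      = acc ++ (items.map pvBullet).flatten := by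
  induction items generalizing acc with
  | nil => simp
  | cons x xs ih =>
    simp only [List.foldl_cons, List.map_cons, List.flatten_cons, ih]
    simp [pvBullet, List.append_assoc]

-- A's [:5] slice is take 5
theorem pv_slice5 (xs : List (List Char)) :
    PySem.List.slice xs none (some 5) = xs.take 5 := by
  have := PySem.List.slice_to xs (b := 5) (by norm_num)
  simpa using this

-- ===== VERDICT (by name: the statement is the Claim_ definition above) =====
set_option maxHeartbeats 1000000 in
set_option maxRecDepth 8192 in
theorem generate_rule_based_summary_spec : Claim_equal_generate_rule_based_summary := by
  intro u t d _
  unfold Spec_generate_rule_based_summary generate_rule_based_summary generate_rule_based_summary_alt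
  rw [pv_collect_eq]
  simp only [List.nil_append, List.length_nil, Nat.sub_zero, pv_slice5, pv_bullet_loop,
    List.map_take, pv_join_nil_eq_flatten, List.foldl_cons, List.foldl_nil, ne_eq,
    List.take_eq_nil_iff, List.map_eq_nil_iff, OfNat.ofNat_ne_zero, false_or]
  split_ifs <;> simp [List.append_assoc]
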